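-- pv_equiv track=rewrite | github.com/devoprops/chinese_translator | backend/app/services/dictionary_service.py | _get_preferred_entry
-- ===== SOURCE A (Python) =====
-- from typing import Dict, List, Optional, Tuple
--
-- def _get_preferred_entry(entries: List[Dict]) -> Optional[Dict]:
--     """
--     Get the preferred entry from a list of entries.
--
--     Priority order:
--     1. Lowercase pinyin (common words) over capitalized (proper nouns)
--     2. Non-surname entries over surname entries
--     3. First entry if all else equal
--
--     Args:
--         entries: List of dictionary entries
--
--     Returns:
--         The preferred entry, or None if list is empty
--     """
--     if not entries:
--         return None
--
--     # Separate entries by type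
--     lowercase_non_surname = []
--     lowercase_surname = []
--     capitalized_non_surname = []
--     capitalized_surname = []
--
--     for entry in entries:
--         pinyin = entry.get('pinyin', '')
--         definition = entry.get('definition', '').lower()
--         is_surname = 'surname' in definition
--         is_capitalized = pinyin and pinyin[0].isupper()
--
--         if not is_capitalized:
--             if not is_surname:
--                 lowercase_non_surname.append(entry)
--             else:
--                 lowercase_surname.append(entry)
--         else:
--             if not is_surname:
--                 capitalized_non_surname.append(entry)
--             else:
--                 capitalized_surname.append(entry)
--
--     # Return in priority order
--     if lowercase_non_surname:
--         return lowercase_non_surname[0]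
--     if lowercase_surname:
--         return lowercase_surname[0]
--     if capitalized_non_surname:
--         return capitalized_non_surname[0]
--     if capitalized_surname:
--         return capitalized_surname[0]
--
--     # Fallback to first entry
--     return entries[0]
-- ===== SOURCE B (Python) =====
-- from typing import Dict, List, Optional
--
-- def _get_preferred_entry(entries: List[Dict]) -> Optional[Dict]:
--     """Return the first entry with the lowest priority (single argmin pass)."""
--     if not entries:
--         return None
--
--     def priority(entry):
--         pinyin = entry.get('pinyin', '')
--         is_capitalized = bool(pinyin) and pinyin[0].isupper()
--         is_surname = 'surname' in entry.get('definition', '').lower()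
--         return 2 * is_capitalized + is_surname
--
--     return min(entries, key=priority)
-- ===== Notes on version B (the rewrite author's own statement) =====
-- stated objective: simpler
-- what changed: Replaced the four-bucket partition plus cascade of emptiness checks by a single stable argmin pass: min(entries, key=priority) with priority = 2*is_capitalized + is_surname.
import Mathlib
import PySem

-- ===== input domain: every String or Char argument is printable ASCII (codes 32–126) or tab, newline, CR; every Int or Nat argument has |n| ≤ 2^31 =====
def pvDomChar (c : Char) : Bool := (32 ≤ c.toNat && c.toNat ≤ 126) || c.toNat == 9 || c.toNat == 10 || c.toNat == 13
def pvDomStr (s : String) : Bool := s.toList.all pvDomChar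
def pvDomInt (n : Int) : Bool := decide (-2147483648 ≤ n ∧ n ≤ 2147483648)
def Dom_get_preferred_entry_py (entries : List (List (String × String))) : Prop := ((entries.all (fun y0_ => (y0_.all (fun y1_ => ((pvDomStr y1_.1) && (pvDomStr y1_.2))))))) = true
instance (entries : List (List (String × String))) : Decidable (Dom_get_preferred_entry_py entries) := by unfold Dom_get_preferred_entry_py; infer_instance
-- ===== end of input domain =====

-- B replaces A's four-bucket partition and cascade of emptiness checks by a single
-- stable argmin pass over an integer priority key (objective: simpler).

-- shared predicates: both Pythons compute exactly these two tests on each entry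
-- is_capitalized = pinyin and pinyin[0].isupper()
def pvCap (entry : List (String × String)) : Bool :=
  match ((PySem.Dict.mk entry).getD "pinyin" "").toList with
  | [] => false
  | c :: _ => PySem.Chars.isupper c

-- is_surname = 'surname' in entry.get('definition','').lower()
def pvSur (entry : List (String × String)) : Bool :=
  PySem.Str.isIn "surname" (PySem.Str.lower ((PySem.Dict.mk entry).getD "definition" ""))

-- ===== PORT A =====
-- loop body of A's for-loop: route the entry into one of the four buckets
def pvStepA (acc : List (List (String × String)) × List (List (String × String)) × List (List (String × String)) × List (List (String × String)))
    (entry : List (String × String)) :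
    List (List (String × String)) × List (List (String × String)) × List (List (String × String)) × List (List (String × String)) :=
  let is_surname := pvSur entry
  let is_capitalized := pvCap entry
  match acc with
  | (lns, ls, cns, cs) =>
    if !is_capitalized then
      if !is_surname then (lns ++ [entry], ls, cns, cs)
      else (lns, ls ++ [entry], cns, cs)
    else
      if !is_surname then (lns, ls, cns ++ [entry], cs)
      else (lns, ls, cns, cs ++ [entry])

def get_preferred_entry_py (entries : List (List (String × String))) : Option (List (String × String)) :=
  if entries.isEmpty then none
  else
    match entries.foldl pvStepA ([], [], [], []) with
    | (lns, ls, cns, cs) =>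
      if !lns.isEmpty then lns.head?
      else if !ls.isEmpty then ls.head?
      else if !cns.isEmpty then cns.head?
      else if !cs.isEmpty then cs.head?
      else entries.head?   -- fallback to entries[0] (unreachable)

-- ===== PORT B =====
-- priority(entry) = 2*is_capitalized + is_surname
def pvPriority (entry : List (String × String)) : Int :=
  2 * (if pvCap entry then 1 else 0) + (if pvSur entry then 1 else 0)

def get_preferred_entry_py_alt (entries : List (List (String × String))) : Option (List (String × String)) :=
  if entries.isEmpty then none
  else PySem.List.min? entries pvPriority

-- ===== PRECONDITION & SPEC =====
def Spec_get_preferred_entry_py (entries : List (List (String × String))) (out : Option (List (String × String))) : Prop := out = get_preferred_entry_py_alt entries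
instance (entries : List (List (String × String))) (out : Option (List (String × String))) : Decidable (Spec_get_preferred_entry_py entries out) := by unfold Spec_get_preferred_entry_py; infer_instance

-- ===== CLAIM (what is proved, stated in full; the proofs are below) =====
def Claim_equal_get_preferred_entry_py : Prop := ∀ (entries : List (List (String × String))), Dom_get_preferred_entry_py entries → Spec_get_preferred_entry_py entries (get_preferred_entry_py entries)

-- ===== LEMMAS AND PROOFS =====

-- first element of xs attaining the minimal pvPriority (right-to-left recursion, left bias)
def pvPick (xs : List (List (String × String))) : Option (List (String × String)) :=
  match xs with
  | [] => none
  | x :: t =>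
    match pvPick t with
    | none => some x
    | some m => if pvPriority m < pvPriority x then some m else some x

lemma pvPriority_range (e : List (String × String)) : 0 ≤ pvPriority e ∧ pvPriority e ≤ 3 := by
  cases h1 : pvCap e <;> cases h2 : pvSur e <;> simp [pvPriority, h1, h2]

lemma pvPick_eq_none_iff (xs : List (List (String × String))) : pvPick xs = none ↔ xs = [] := by
  cases xs with
  | nil => simp [pvPick]
  | cons x t => simp [pvPick]; cases pvPick t <;> simp <;> split <;> simp

lemma pvMinAux (t : List (List (String × String))) (m : List (String × String)) :
    PySem.List.min? (m :: t) pvPriority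
    = match pvPick t with
      | none => some m
      | some m' => if pvPriority m' < pvPriority m then some m' else some m := by
  induction t generalizing m with
  | nil => simp [pvPick, PySem.List.min?]
  | cons y t ih =>
    by_cases hc : pvPriority y < pvPriority m
    · have hstep : PySem.List.min? (m :: y :: t) pvPriority
          = PySem.List.min? (y :: t) pvPriority := by
        simp [PySem.List.min?, List.foldl_cons, hc]
      rw [hstep, ih y]
      simp only [pvPick]
      cases h : pvPick t with
      | none => simp; omega
      | some m' => simp only; split_ifs <;> simp_all <;> omega
    · have hstep : PySem.List.min? (m :: y :: t) pvPriority
          = PySem.List.min? (m :: t) pvPriority := by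
        simp [PySem.List.min?, List.foldl_cons, hc]
      rw [hstep, ih m]
      simp only [pvPick]
      cases h : pvPick t with
      | none => simp; omega
      | some m' => simp only; split_ifs <;> simp_all <;> omega

lemma pvMin?_eq_pick (xs : List (List (String × String))) :
    PySem.List.min? xs pvPriority = pvPick xs := by
  cases xs with
  | nil => rfl
  | cons x t =>
    rw [pvMinAux t x]
    cases h : pvPick t with
    | none => simp [pvPick, h]
    | some m' => simp [pvPick, h]

-- bucket of priority i
def pvBk (i : Int) (xs : List (List (String × String))) : List (List (String × String)) :=
  xs.filter (fun e => pvPriority e == i)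

lemma pvBk_cons (i : Int) (x : List (String × String)) (t : List (List (String × String))) :
    pvBk i (x :: t) = if pvPriority x = i then x :: pvBk i t else pvBk i t := by
  by_cases h : pvPriority x = i <;> simp [pvBk, List.filter_cons, h]

lemma pvFoldA (xs : List (List (String × String))) (a b c d : List (List (String × String))) :
    xs.foldl pvStepA (a, b, c, d)
      = (a ++ pvBk 0 xs, b ++ pvBk 1 xs, c ++ pvBk 2 xs, d ++ pvBk 3 xs) := by
  induction xs generalizing a b c d with
  | nil => simp [pvBk]
  | cons x t ih =>
    simp only [List.foldl_cons, pvStepA]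
    cases h1 : pvCap x <;> cases h2 : pvSur x <;>
      simp only [h1, h2, Bool.not_false, Bool.not_true, if_true, if_false] <;>
      rw [ih] <;>
      simp [pvBk_cons, pvPriority, h1, h2]

lemma pvPick_spec (xs : List (List (String × String))) (m : List (String × String))
    (h : pvPick xs = some m) :
    (∀ i : Int, i < pvPriority m → pvBk i xs = []) ∧ (pvBk (pvPriority m) xs).head? = some m := by
  induction xs generalizing m with
  | nil => simp [pvPick] at h
  | cons x t ih =>
    simp only [pvPick] at h
    cases hp : pvPick t with
    | none =>
      rw [hp] at h
      simp at h
      subst h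
      rw [(pvPick_eq_none_iff t).mp hp]
      refine ⟨fun i hi => ?_, ?_⟩
      · rw [pvBk_cons, if_neg (by omega)]; rfl
      · rw [pvBk_cons, if_pos rfl]; rfl
    | some m' =>
      rw [hp] at h
      simp only at h
      obtain ⟨hlow, hhead⟩ := ih m' hp
      by_cases hc : pvPriority m' < pvPriority x
      · rw [if_pos hc] at h
        simp at h; subst h
        refine ⟨fun i hi => ?_, ?_⟩
        · rw [pvBk_cons, if_neg (by omega)]; exact hlow i hi
        · rw [pvBk_cons, if_neg (by omega)]; exact hhead
      · rw [if_neg hc] at h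
        simp at h; subst h
        refine ⟨fun i hi => ?_, ?_⟩
        · rw [pvBk_cons, if_neg (by omega)]; exact hlow i (by omega)
        · rw [pvBk_cons, if_pos rfl]; rfl

lemma pvHead_ne_nil {ys : List (List (String × String))} {m : List (String × String)}
    (h : ys.head? = some m) : ys.isEmpty = false := by
  cases ys <;> simp_all

theorem pvMain (entries : List (List (String × String))) :
    get_preferred_entry_py entries = get_preferred_entry_py_alt entries := by
  cases hxs : entries with
  | nil => rfl
  | cons x t =>
    cases hp : pvPick (x :: t) with
    | none => simp [pvPick_eq_none_iff] at hp
    | some m =>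
      obtain ⟨hlow, hhead⟩ := pvPick_spec (x :: t) m hp
      obtain ⟨hr0, hr3⟩ := pvPriority_range m
      simp only [get_preferred_entry_py, get_preferred_entry_py_alt, List.isEmpty_cons,
        Bool.false_eq_true, if_false, pvFoldA, List.nil_append, pvMin?_eq_pick, hp]
      have hcase : pvPriority m = 0 ∨ pvPriority m = 1 ∨ pvPriority m = 2 ∨ pvPriority m = 3 := by
        omega
      rcases hcase with h | h | h | h <;> rw [h] at hlow hhead
      · rw [if_pos (by simp [pvHead_ne_nil hhead])]
        exact hhead
      · rw [if_neg (by simp [hlow 0 (by omega)]), if_pos (by simp [pvHead_ne_nil hhead])]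
        exact hhead
      · rw [if_neg (by simp [hlow 0 (by omega)]), if_neg (by simp [hlow 1 (by omega)]),
          if_pos (by simp [pvHead_ne_nil hhead])]
        exact hhead
      · rw [if_neg (by simp [hlow 0 (by omega)]), if_neg (by simp [hlow 1 (by omega)]),
          if_neg (by simp [hlow 2 (by omega)]), if_pos (by simp [pvHead_ne_nil hhead])]
        exact hhead

-- ===== VERDICT (by name: the statement is the Claim_ definition above) =====
theorem get_preferred_entry_py_spec : Claim_equal_get_preferred_entry_py := by
  intro entries _
  exact pvMain entries
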